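-- pv_equiv track=rewrite | github.com/kkyungseo/Baekjoon_Tier_Challenger | Python/백준/Bronze/25629. 홀짝 수열/홀짝 수열.py | can_form_odd_even_sequence
-- ===== SOURCE A (Python) =====
-- def can_form_odd_even_sequence(n, sequence):
--     # 홀수와 짝수 분리 및 정렬
--     odd_numbers = sorted([x for x in sequence if x % 2 == 1])
--     even_numbers = sorted([x for x in sequence if x % 2 == 0])
--
--     odd_index, even_index = 0, 0
--     result_sequence = []
--
--     for i in range(n):
--         if i % 2 == 0:  # 1-based 기준으로 홀수 번째 위치
--             if odd_index >= len(odd_numbers):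
--                 return 0
--             result_sequence.append(odd_numbers[odd_index])
--             odd_index += 1
--         else:  # 짝수 번째 위치
--             if even_index >= len(even_numbers):
--                 return 0
--             result_sequence.append(even_numbers[even_index])
--             even_index += 1
--
--     return 1  # 조건을 만족하는 수열 생성 가능
-- ===== SOURCE B (Python) =====
-- def can_form_odd_even_sequence(n, sequence):
--     odds = sum(1 for x in sequence if x % 2 != 0)
--     evens = len(sequence) - odds
--     return 1 if odds >= (n + 1) // 2 and evens >= n // 2 else 0
-- ===== Notes on version B (the rewrite author's own statement) =====
-- stated objective: faster
-- what changed: Replaces the two sorts plus the simulated alternating fill with a single pass that counts odd elements and compares the two counts against ceil(n/2) and floor(n/2).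
import Mathlib
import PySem

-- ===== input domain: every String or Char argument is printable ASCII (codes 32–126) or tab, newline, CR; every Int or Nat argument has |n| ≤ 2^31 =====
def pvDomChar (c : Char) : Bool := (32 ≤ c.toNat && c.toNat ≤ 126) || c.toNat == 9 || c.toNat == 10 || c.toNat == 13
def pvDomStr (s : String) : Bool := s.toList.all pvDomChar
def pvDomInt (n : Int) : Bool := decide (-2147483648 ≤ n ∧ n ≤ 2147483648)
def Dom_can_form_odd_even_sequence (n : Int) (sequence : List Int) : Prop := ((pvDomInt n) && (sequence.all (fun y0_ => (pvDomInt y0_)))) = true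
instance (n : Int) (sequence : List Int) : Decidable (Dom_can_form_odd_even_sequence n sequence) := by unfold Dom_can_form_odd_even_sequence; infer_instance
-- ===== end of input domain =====

-- B replaces A's two sorts plus simulated alternating fill by counting odd elements and
-- comparing the counts to ceil(n/2) and floor(n/2) (objective: faster, asymptotic).


-- ===== PORT A =====
-- A's 'for i in range(n)' loop with early 'return 0'; state = (odd_index, even_index, result_sequence).
-- The list accesses odds[odd_index]/evens[even_index] are guarded in range, so pyGetD with default 0 is exact.
-- k = iterations remaining, i = current loop index (range(n) is lazy in Python, so the
-- loop is rendered as a countdown with the running index i, not a pre-built list).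
def pvLoopA (odds evens : List Int) : Nat → Int → Int → Int → List Int → Int
  | 0, _i, _oi, _ei, _res => 1
  | k + 1, i, oi, ei, res =>
    if PySem.Int.mod i 2 == 0 then
      if oi ≥ (odds.length : Int) then 0
      else pvLoopA odds evens k (i + 1) (oi + 1) ei (res ++ [PySem.List.pyGetD odds oi 0])
    else
      if ei ≥ (evens.length : Int) then 0
      else pvLoopA odds evens k (i + 1) oi (ei + 1) (res ++ [PySem.List.pyGetD evens ei 0])

def can_form_odd_even_sequence (n : Int) (sequence : List Int) : Int :=
  let odd_numbers := PySem.List.sorted (sequence.filter (fun x => PySem.Int.mod x 2 == 1)) (fun x => x)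
  let even_numbers := PySem.List.sorted (sequence.filter (fun x => PySem.Int.mod x 2 == 0)) (fun x => x)
  pvLoopA odd_numbers even_numbers n.toNat 0 0 0 []

-- ===== PORT B =====
def can_form_odd_even_sequence_alt (n : Int) (sequence : List Int) : Int :=
  let odds : Int := (sequence.countP (fun x => !(PySem.Int.mod x 2 == 0)) : Int)
  let evens : Int := (sequence.length : Int) - odds
  if odds ≥ PySem.Int.floordiv (n + 1) 2 ∧ evens ≥ PySem.Int.floordiv n 2 then 1 else 0

-- ===== PRECONDITION & SPEC =====
def Spec_can_form_odd_even_sequence (n : Int) (sequence : List Int) (out : Int) : Prop := out = can_form_odd_even_sequence_alt n sequence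
instance (n : Int) (sequence : List Int) (out : Int) : Decidable (Spec_can_form_odd_even_sequence n sequence out) := by unfold Spec_can_form_odd_even_sequence; infer_instance

-- ===== CLAIM (what is proved, stated in full; the proofs are below) =====
def Claim_equal_can_form_odd_even_sequence : Prop := ∀ (n : Int) (sequence : List Int), Dom_can_form_odd_even_sequence n sequence → Spec_can_form_odd_even_sequence n sequence (can_form_odd_even_sequence n sequence)

-- ===== LEMMAS AND PROOFS =====

-- For any x, Python's x % 2 is 0 or 1, so 'x % 2 == 1' is the negation of 'x % 2 == 0'.
lemma pvOddIffNotEven (x : Int) : (PySem.Int.mod x 2 == 1) = !(PySem.Int.mod x 2 == 0) := by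
  rw [PySem.Int.mod_eq_emod_of_pos (a := x) (by norm_num : (0:Int) < 2)]
  by_cases h : x % 2 = 0
  · simp [h]
  · have h1 : x % 2 = 1 := by omega
    simp [h1]

-- The loop succeeds iff enough odd/even numbers remain for the even-/odd-parity loop indices.
lemma pvLoopA_char (odds evens : List Int) (k : Nat) (i oi ei : Int) (res : List Int)
    (hoi : oi ≤ (odds.length : Int)) (hei : ei ≤ (evens.length : Int)) :
    pvLoopA odds evens k i oi ei res =
      if (((PySem.List.pyRange i (i + k) 1).countP (fun j => PySem.Int.mod j 2 == 0) : Int) ≤ (odds.length : Int) - oi ∧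
          ((PySem.List.pyRange i (i + k) 1).countP (fun j => !(PySem.Int.mod j 2 == 0)) : Int) ≤ (evens.length : Int) - ei)
      then 1 else 0 := by
  induction k generalizing i oi ei res with
  | zero =>
    rw [show i + ((0:Nat):Int) = i by omega, PySem.List.pyRange_one_eq_nil le_rfl, if_pos]
    · rfl
    · simp only [List.countP_nil, Int.natCast_zero]; omega
  | succ k ih =>
    rw [show i + ((k+1:Nat):Int) = (i+1) + (k:Nat) by push_cast; ring,
        PySem.List.pyRange_one_cons (by omega : i < (i+1) + ((k:Nat):Int)),
        List.countP_cons, List.countP_cons]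
    show (if (PySem.Int.mod i 2 == 0) = true then _ else _) = _
    by_cases hp : (PySem.Int.mod i 2 == 0) = true
    · rw [if_pos hp]
      simp only [hp, if_true, Bool.not_true, Bool.false_eq_true, if_false, Nat.add_zero]
      by_cases hfull : oi ≥ (odds.length : Int)
      · rw [if_pos hfull, if_neg]
        rintro ⟨h1, h2⟩
        push_cast at h1
        omega
      · rw [if_neg hfull, ih (i + 1) (oi + 1) ei _ (by omega) hei]
        refine if_congr ?_ rfl rfl
        push_cast
        constructor <;> rintro ⟨h1, h2⟩ <;> exact ⟨by omega, by omega⟩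
    · rw [if_neg hp]
      simp only [Bool.not_eq_true'] at *
      simp only [hp, if_true]
      by_cases hfull : ei ≥ (evens.length : Int)
      · rw [if_pos hfull, if_neg]
        rintro ⟨h1, h2⟩
        push_cast at h2
        omega
      · rw [if_neg hfull, ih (i + 1) oi (ei + 1) _ hoi (by omega)]
        refine if_congr ?_ rfl rfl
        push_cast
        constructor <;> rintro ⟨h1, h2⟩ <;> exact ⟨by omega, by omega⟩

-- Parity counts of range(0, m): ceil(m/2) even indices, floor(m/2) odd indices.
lemma pvRangeCounts (m : Nat) :
    (PySem.List.pyRange 0 (m : Int) 1).countP (fun i => PySem.Int.mod i 2 == 0) = (m + 1) / 2 ∧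
    (PySem.List.pyRange 0 (m : Int) 1).countP (fun i => !(PySem.Int.mod i 2 == 0)) = m / 2 := by
  induction m with
  | zero => simp [PySem.List.pyRange_one_eq_nil (by norm_num : (0:Int) ≤ 0)]
  | succ k ih =>
    have h : PySem.List.pyRange 0 ((k + 1 : Nat) : Int) 1
        = PySem.List.pyRange 0 (k : Int) 1 ++ [(k : Int)] := by
      push_cast
      exact PySem.List.pyRange_one_succ_right (by positivity)
    rw [h]
    have hm : PySem.Int.mod (k : Int) 2 = (k : Int) % 2 :=
      PySem.Int.mod_eq_emod_of_pos (by norm_num)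
    rw [List.countP_append, List.countP_append, ih.1, ih.2,
        List.countP_cons, List.countP_cons, List.countP_nil]
    show _ ∧ _
    constructor
    · show (k + 1) / 2 + (0 + if (PySem.Int.mod (k:Int) 2 == 0) = true then 1 else 0) = (k + 1 + 1) / 2
      rw [hm]
      by_cases hk : k % 2 = 0
      · rw [if_pos (by simp; omega)]; omega
      · rw [if_neg (by simp; omega)]; omega
    · show k / 2 + (0 + if (!(PySem.Int.mod (k:Int) 2 == 0)) = true then 1 else 0) = (k + 1) / 2
      rw [hm]
      by_cases hk : k % 2 = 0
      · rw [if_neg (by simp; omega)]; omega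
      · rw [if_pos (by simp; omega)]; omega

-- ===== VERDICT (by name: the statement is the Claim_ definition above) =====
theorem can_form_odd_even_sequence_spec : Claim_equal_can_form_odd_even_sequence := by
  intro n sequence _dom
  unfold Spec_can_form_odd_even_sequence can_form_odd_even_sequence can_form_odd_even_sequence_alt
  have hodds : ((PySem.List.sorted (sequence.filter (fun x => PySem.Int.mod x 2 == 1)) (fun x => x)).length : Int)
      = (sequence.countP (fun x => !(PySem.Int.mod x 2 == 0)) : Int) := by
    rw [PySem.List.length_sorted, ← List.countP_eq_length_filter]
    exact congrArg _ (List.countP_congr (fun x _ => by rw [pvOddIffNotEven]))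
  have hevens : ((PySem.List.sorted (sequence.filter (fun x => PySem.Int.mod x 2 == 0)) (fun x => x)).length : Int)
      = (sequence.length : Int) - (sequence.countP (fun x => !(PySem.Int.mod x 2 == 0)) : Int) := by
    rw [PySem.List.length_sorted, ← List.countP_eq_length_filter]
    have h := List.length_eq_countP_add_countP (p := fun x => PySem.Int.mod x 2 == 0) (l := sequence)
    have hneg : sequence.countP (fun x => ¬ (PySem.Int.mod x 2 == 0) = true)
        = sequence.countP (fun x => !(PySem.Int.mod x 2 == 0)) :=
      List.countP_congr (fun x _ => by simp)
    rw [hneg] at h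
    push_cast [h]
    ring
  have hcle : (sequence.countP (fun x => !(PySem.Int.mod x 2 == 0)) : Int) ≤ (sequence.length : Int) := by
    exact_mod_cast List.countP_le_length
  have hc0 : (0:Int) ≤ (sequence.countP (fun x => !(PySem.Int.mod x 2 == 0)) : Int) := by positivity
  by_cases hn : n ≤ 0
  · have h0 : n.toNat = 0 := by omega
    rw [h0]
    show (1:Int) = _
    have hd1 : PySem.Int.floordiv (n + 1) 2 = (n + 1) / 2 :=
      PySem.Int.floordiv_eq_ediv_of_pos (by norm_num)
    have hd2 : PySem.Int.floordiv n 2 = n / 2 :=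
      PySem.Int.floordiv_eq_ediv_of_pos (by norm_num)
    rw [if_pos]
    rw [hd1, hd2]
    exact ⟨by omega, by omega⟩
  · have hn' : 0 < n := by omega
    obtain ⟨m, hm⟩ : ∃ m : Nat, n = (m : Int) := ⟨n.toNat, by omega⟩
    subst hm
    have htn : ((m : Int)).toNat = m := by omega
    rw [htn, pvLoopA_char _ _ m 0 0 0 [] (by positivity) (by positivity),
        show (0:Int) + (m:Nat) = (m:Int) by omega,
        (pvRangeCounts m).1, (pvRangeCounts m).2, hodds, hevens]
    have hd1 : PySem.Int.floordiv ((m : Int) + 1) 2 = (((m + 1) / 2 : Nat) : Int) := by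
      exact_mod_cast PySem.Int.floordiv_natCast (m + 1) 2
    have hd2 : PySem.Int.floordiv (m : Int) 2 = ((m / 2 : Nat) : Int) := by
      exact_mod_cast PySem.Int.floordiv_natCast m 2
    rw [hd1, hd2]
    refine if_congr ?_ rfl rfl
    constructor <;> rintro ⟨h1, h2⟩ <;> exact ⟨by omega, by omega⟩
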